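-- pv_equiv track=rewrite | github.com/JeongHunHui/coding-test-practice | 백준/Gold/17779. 게리맨더링 2/게리맨더링 2.py | is_num_five
-- ===== SOURCE A (Python) =====
-- def is_num_five(x, y, d1, d2, r, c):
--     up = y
--     down = y
--     if r == x:
--         if up <= c <= down:
--             return True
--         else:
--             return False
--     for i in range(1, d1+d2+1):
--         if i <= d1:
--             up -= 1
--         else:
--             up += 1
--         if i <= d2:
--             down += 1
--         else:
--             down -= 1
--         if r == x+i:
--             if up <= c <= down:
--                 return True
--             else:
--                 return False
--     return False
-- ===== SOURCE B (Python) =====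
-- def is_num_five(x, y, d1, d2, r, c):
--     i = r - x
--     if i == 0:
--         return c == y
--     if i < 1 or i > d1 + d2:
--         return False
--     a = min(i, max(d1, 0))
--     b = min(i, max(d2, 0))
--     up = y + i - 2 * a
--     down = y - i + 2 * b
--     return up <= c <= down
-- ===== Notes on version B (the rewrite author's own statement) =====
-- stated objective: faster
-- what changed: Replaced the O(d1+d2) simulation loop over all rows with O(1) closed-form piecewise formulas for the up/down boundaries at row i = r - x.
import Mathlib
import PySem

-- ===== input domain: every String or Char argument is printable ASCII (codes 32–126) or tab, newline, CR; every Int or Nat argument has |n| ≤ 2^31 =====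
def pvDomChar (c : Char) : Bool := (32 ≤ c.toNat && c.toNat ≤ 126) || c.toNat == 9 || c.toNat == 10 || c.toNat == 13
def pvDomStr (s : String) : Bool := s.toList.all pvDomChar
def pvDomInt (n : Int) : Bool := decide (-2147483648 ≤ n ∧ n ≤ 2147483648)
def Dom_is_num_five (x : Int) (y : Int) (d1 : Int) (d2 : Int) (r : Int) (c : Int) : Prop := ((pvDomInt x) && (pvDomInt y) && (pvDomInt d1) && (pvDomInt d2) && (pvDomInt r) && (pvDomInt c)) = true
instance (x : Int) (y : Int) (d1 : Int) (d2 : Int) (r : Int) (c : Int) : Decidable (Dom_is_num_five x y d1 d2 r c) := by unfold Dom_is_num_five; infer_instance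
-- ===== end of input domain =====

-- B replaces A's O(d1+d2) row-by-row simulation loop by O(1) closed-form piecewise
-- formulas for the region-5 boundaries at row i = r - x (objective: faster, asymptotic).

-- ===== PORT A =====
-- A's 'for i in range(1, d1+d2+1)' loop with early return, as tail recursion on the
-- remaining iteration count (fuel = range length), carrying the same (i, up, down) state.
def is_num_five_go (x : Int) (d1 : Int) (d2 : Int) (r : Int) (c : Int) :
    Nat → Int → Int → Int → Bool
  | 0, _, _, _ => false
  | n + 1, i, up, down =>
    let up' := if i ≤ d1 then up - 1 else up + 1
    let down' := if i ≤ d2 then down + 1 else down - 1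
    if r == x + i then (decide (up' ≤ c) && decide (c ≤ down'))
    else is_num_five_go x d1 d2 r c n (i + 1) up' down'

def is_num_five (x : Int) (y : Int) (d1 : Int) (d2 : Int) (r : Int) (c : Int) : Bool :=
  let up := y
  let down := y
  if r == x then (decide (up ≤ c) && decide (c ≤ down))
  else is_num_five_go x d1 d2 r c (d1 + d2).toNat 1 up down

-- ===== PORT B =====
def is_num_five_alt (x : Int) (y : Int) (d1 : Int) (d2 : Int) (r : Int) (c : Int) : Bool :=
  let i := r - x
  if i == 0 then c == y
  else if i < 1 || d1 + d2 < i then false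
  else
    let a := min i (max d1 0)
    let b := min i (max d2 0)
    let up := y + i - 2 * a
    let down := y - i + 2 * b
    decide (up ≤ c) && decide (c ≤ down)

-- ===== PRECONDITION & SPEC =====
def Spec_is_num_five (x : Int) (y : Int) (d1 : Int) (d2 : Int) (r : Int) (c : Int) (out : Bool) : Prop := out = is_num_five_alt x y d1 d2 r c
instance (x : Int) (y : Int) (d1 : Int) (d2 : Int) (r : Int) (c : Int) (out : Bool) : Decidable (Spec_is_num_five x y d1 d2 r c out) := by unfold Spec_is_num_five; infer_instance

-- ===== CLAIM (what is proved, stated in full; the proofs are below) =====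
def Claim_equal_is_num_five : Prop := ∀ (x : Int) (y : Int) (d1 : Int) (d2 : Int) (r : Int) (c : Int), Dom_is_num_five x y d1 d2 r c → Spec_is_num_five x y d1 d2 r c (is_num_five x y d1 d2 r c)

-- ===== LEMMAS AND PROOFS =====

-- closed-form boundaries after processing rows 1..j of A's loop
def pvUp (y : Int) (d1 : Int) (j : Int) : Int := y + j - 2 * min j (max d1 0)
def pvDown (y : Int) (d2 : Int) (j : Int) : Int := y - j + 2 * min j (max d2 0)

theorem pvUp_step (y d1 k : Int) (hk : 1 ≤ k) :
    pvUp y d1 k = if k ≤ d1 then pvUp y d1 (k - 1) - 1 else pvUp y d1 (k - 1) + 1 := by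
  unfold pvUp; split <;> omega

theorem pvDown_step (y d2 k : Int) (hk : 1 ≤ k) :
    pvDown y d2 k = if k ≤ d2 then pvDown y d2 (k - 1) + 1 else pvDown y d2 (k - 1) - 1 := by
  unfold pvDown; split <;> omega

theorem go_eq (x d1 d2 r c y : Int) :
    ∀ (n : Nat) (k : Int), 1 ≤ k → (n : Int) + k = max (d1 + d2 + 1) k →
    is_num_five_go x d1 d2 r c n k (pvUp y d1 (k - 1)) (pvDown y d2 (k - 1)) =
      if k ≤ r - x ∧ r - x ≤ d1 + d2 then
        (decide (pvUp y d1 (r - x) ≤ c) && decide (c ≤ pvDown y d2 (r - x)))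
      else false := by
  intro n
  induction n with
  | zero =>
    intro k hk hb
    simp only [Nat.cast_zero, zero_add] at hb
    simp [is_num_five_go]
    omega
  | succ m ih =>
    intro k hk hb
    have hend : k ≤ d1 + d2 := by omega
    · simp only [is_num_five_go]
      rw [← pvUp_step y d1 k hk, ← pvDown_step y d2 k hk]
      by_cases hr : r = x + k
      · simp only [hr, beq_iff_eq]
        have hrx : x + k - x = k := by omega
        rw [hrx, if_pos (show k ≤ k ∧ k ≤ d1 + d2 from ⟨le_refl k, by omega⟩)]
        simp
      · rw [if_neg (by simpa using hr)]
        have hk1 : (1 : Int) ≤ k + 1 := by omega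
        have := ih (k + 1) hk1 (by push_cast at hb ⊢; omega)
        simp only [add_sub_cancel_right] at this
        rw [this]
        by_cases hc : k + 1 ≤ r - x ∧ r - x ≤ d1 + d2
        · rw [if_pos hc, if_pos ⟨by omega, hc.2⟩]
        · rw [if_neg hc, if_neg (by omega)]

theorem pvUp_zero (y d1 : Int) : pvUp y d1 0 = y := by unfold pvUp; omega
theorem pvDown_zero (y d2 : Int) : pvDown y d2 0 = y := by unfold pvDown; omega

-- ===== VERDICT (by name: the statement is the Claim_ definition above) =====
theorem is_num_five_spec : Claim_equal_is_num_five := by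
  intro x y d1 d2 r c _
  unfold Spec_is_num_five is_num_five is_num_five_alt
  by_cases h0 : r = x
  · subst h0
    simp only [beq_self_eq_true, if_true, sub_self]
    rw [Bool.eq_iff_iff]
    simp only [Bool.and_eq_true, decide_eq_true_eq, beq_iff_eq]
    omega
  · rw [if_neg (by simpa using h0), if_neg (by simp; omega)]
    have := go_eq x d1 d2 r c y (d1 + d2).toNat 1 le_rfl (by omega)
    simp only [sub_self, pvUp_zero, pvDown_zero] at this
    rw [this]
    by_cases hc : 1 ≤ r - x ∧ r - x ≤ d1 + d2
    · rw [if_pos hc, if_neg (by simp; omega)]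
      unfold pvUp pvDown
      rfl
    · rw [if_neg hc, if_pos (by simp; omega)]
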